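-- pv_equiv track=rewrite | github.com/astrojags/lunarlog | population.py | _get_active_periods
-- ===== SOURCE A (Python) =====
-- from typing import List, Tuple, Dict, Optional
-- from typing import Dict, List, Tuple, Set, Optional
-- from typing import Dict, List, Optional, Tuple
-- from typing import List, Dict, Set, Optional, Tuple
-- from typing import List, Dict, Set, Optional
-- from typing import Dict, List, Optional, Set
--
-- def _get_active_periods(timeline: List[int]) -> List[Tuple[int, int]]:
--     """
--     Extract periods where a vehicle is active from its timeline.
--     Returns list of (start, end) tuples.
--     """
--     active_periods = []
--     start = None
--
--     for t, active in enumerate(timeline):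
--         if active and start is None:
--             start = t
--         elif not active and start is not None:
--             active_periods.append((start, t-1))
--             start = None
--
--     if start is not None:
--         active_periods.append((start, len(timeline)-1))
--
--     return active_periods
-- ===== SOURCE B (Python) =====
-- from itertools import groupby
--
-- def _get_active_periods(timeline):
--     """
--     Extract periods where a vehicle is active from its timeline.
--     Returns list of (start, end) tuples.
--     """
--     periods = []
--     for key, grp in groupby(enumerate(timeline), key=lambda p: bool(p[1])):
--         if key:
--             pairs = list(grp)
--             periods.append((pairs[0][0], pairs[-1][0]))
--     return periods
-- ===== Notes on version B (the rewrite author's own statement) =====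
-- stated objective: idiomatic
-- what changed: B drops A's start/None sentinel state machine and trailing flush, instead grouping consecutive runs with itertools.groupby over enumerate and emitting (first,last) index of each truthy run.
import Mathlib
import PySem

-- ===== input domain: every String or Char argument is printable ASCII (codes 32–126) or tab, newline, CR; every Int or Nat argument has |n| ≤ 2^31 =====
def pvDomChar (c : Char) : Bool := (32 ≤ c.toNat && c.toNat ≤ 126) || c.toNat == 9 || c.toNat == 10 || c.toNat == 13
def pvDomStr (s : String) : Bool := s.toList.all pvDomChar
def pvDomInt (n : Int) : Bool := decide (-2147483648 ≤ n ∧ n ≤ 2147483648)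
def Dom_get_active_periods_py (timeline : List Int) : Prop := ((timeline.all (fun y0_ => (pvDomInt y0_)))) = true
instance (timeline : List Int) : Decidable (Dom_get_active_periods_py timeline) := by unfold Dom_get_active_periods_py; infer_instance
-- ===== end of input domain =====

-- B replaces A's start/None sentinel state machine (with trailing flush) by grouping
-- consecutive equal-key runs (itertools.groupby over enumerate); objective: idiomatic.

-- ===== PORT A =====
-- A's loop over enumerate(timeline) with state (active_periods, start);
-- n is len(timeline), used only for the final flush `(start, len(timeline)-1)`.
def aGo (n : Int) : List Int → Int → Option Int → List (Int × Int) → List (Int × Int)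
  | [], _, start, acc =>
    match start with
    | some s => acc ++ [(s, n - 1)]
    | none => acc
  | v :: rest, t, start, acc =>
    if v ≠ 0 then
      match start with
      | none => aGo n rest (t + 1) (some t) acc
      | some s => aGo n rest (t + 1) (some s) acc
    else
      match start with
      | some s => aGo n rest (t + 1) none (acc ++ [(s, t - 1)])
      | none => aGo n rest (t + 1) none acc

def get_active_periods_py (timeline : List Int) : List (Int × Int) :=
  aGo (timeline.length : Int) timeline 0 none []

-- ===== PORT B =====
-- enumerate(timeline) starting at index t
def enumF (t : Int) : List Int → List (Int × Int)
  | [] => []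
  | v :: rest => (t, v) :: enumF (t + 1) rest

-- the groupby key: bool(p[1])
def pvActive (p : Int × Int) : Bool := p.2 != 0

-- itertools.groupby pass: peel the run of pairs with the same key as the head;
-- if the key is truthy, emit (first index, last index) of the run.
def grpB : List (Int × Int) → List (Int × Int)
  | [] => []
  | (i, v) :: rest =>
    let b := pvActive (i, v)
    let run := rest.takeWhile (fun p => pvActive p == b)
    let rest' := rest.dropWhile (fun p => pvActive p == b)
    if v ≠ 0 then (i, (run.getLastD (i, v)).1) :: grpB rest'
    else grpB rest'
termination_by l => l.length
decreasing_by
  all_goals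
    have h := List.length_dropWhile_le (fun p => pvActive p == pvActive (i, v)) rest
    simp only [List.length_cons]
    omega

def get_active_periods_py_alt (timeline : List Int) : List (Int × Int) :=
  grpB (enumF 0 timeline)

-- ===== PRECONDITION & SPEC =====
def Spec_get_active_periods_py (timeline : List Int) (out : List (Int × Int)) : Prop := out = get_active_periods_py_alt timeline
instance (timeline : List Int) (out : List (Int × Int)) : Decidable (Spec_get_active_periods_py timeline out) := by unfold Spec_get_active_periods_py; infer_instance

-- ===== CLAIM (what is proved, stated in full; the proofs are below) =====
def Claim_equal_get_active_periods_py : Prop := ∀ (timeline : List Int), Dom_get_active_periods_py timeline → Spec_get_active_periods_py timeline (get_active_periods_py timeline)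

-- ===== LEMMAS AND PROOFS =====

-- skipping an inactive head does not change the grouped result
theorem grpB_cons_inactive (i : Int) (xs : List (Int × Int)) :
    grpB ((i, 0) :: xs) = grpB xs := by
  rw [grpB]
  simp only [pvActive, bne_self_eq_false, ne_eq, not_true_eq_false, if_false, beq_false]
  match xs with
  | [] => simp
  | (j, w) :: ys =>
    by_cases hw : w = 0
    · subst hw
      rw [grpB]
      simp [pvActive, List.dropWhile]
    · have hwb : (!(w != 0)) = false := by simp [bne, hw]
      simp [List.dropWhile, hwb]

-- unfolding grpB on an active head, with the key condition discharged
theorem grpB_cons_active (i v : Int) (hv : v ≠ 0) (xs : List (Int × Int)) :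
    grpB ((i, v) :: xs) =
      (i, ((xs.takeWhile (fun p => p.2 != 0)).getLastD (i, v)).1)
        :: grpB (xs.dropWhile (fun p => p.2 != 0)) := by
  rw [grpB]
  have hb : pvActive (i, v) = true := by simp [pvActive, bne, hv]
  simp only [hb, if_pos hv, beq_true]
  rfl

theorem enumF_takeWhile (q : Int → Bool) (l : List Int) (t : Int) :
    (enumF t l).takeWhile (fun p => q p.2) = enumF t (l.takeWhile q) := by
  induction l generalizing t with
  | nil => simp [enumF]
  | cons v rest ih =>
    by_cases hv : q v = true
    · simp [enumF, List.takeWhile, hv, ih]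
    · simp [enumF, List.takeWhile, Bool.eq_false_iff.mpr hv]

theorem enumF_dropWhile (q : Int → Bool) (l : List Int) (t : Int) :
    (enumF t l).dropWhile (fun p => q p.2)
      = enumF (t + (l.takeWhile q).length) (l.dropWhile q) := by
  induction l generalizing t with
  | nil => simp [enumF]
  | cons v rest ih =>
    by_cases hv : q v = true
    · simp only [enumF, List.dropWhile, List.takeWhile, hv]
      rw [ih]
      congr 1
      simp only [List.length_cons]
      push_cast
      ring
    · simp [enumF, List.dropWhile, List.takeWhile, Bool.eq_false_iff.mpr hv]

theorem enumF_getLastD (l : List Int) (t : Int) (d : Int × Int) :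
    ((enumF (t + 1) l).getLastD d).1
      = if l = [] then d.1 else t + l.length := by
  induction l generalizing t d with
  | nil => simp [enumF]
  | cons v rest ih =>
    simp only [enumF, List.getLastD_cons]
    rw [ih]
    by_cases h : rest = []
    · simp [h]
    · simp only [h, if_false, List.length_cons, reduceCtorEq]
      push_cast
      ring

-- the combined loop invariant: A's fold from state `none` equals grpB of the
-- enumerated suffix, and from state `some s` it first closes the current active run.
theorem aGo_inv (l : List Int) : ∀ (t : Int) (acc : List (Int × Int)),
    (aGo (t + l.length) l t none acc = acc ++ grpB (enumF t l)) ∧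
    (∀ s, aGo (t + l.length) l t (some s) acc
        = acc ++ (s, t + ((l.takeWhile (fun v => v != 0)).length : Int) - 1)
            :: grpB (enumF (t + ((l.takeWhile (fun v => v != 0)).length : Int))
                          (l.dropWhile (fun v => v != 0)))) := by
  induction l with
  | nil =>
    intro t acc
    refine ⟨by simp [aGo, enumF, grpB], fun s => by simp [aGo, enumF, grpB]⟩
  | cons v rest ih =>
    intro t acc
    have hlen : t + ((v :: rest).length : Int) = (t + 1) + (rest.length : Int) := by
      simp only [List.length_cons]; push_cast; ring
    by_cases hv : v = 0
    · subst hv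
      have hstep : enumF t ((0 : Int) :: rest) = (t, 0) :: enumF (t + 1) rest := rfl
      constructor
      · rw [aGo, hlen, if_neg (by simp)]
        rw [(ih (t + 1) acc).1, hstep, grpB_cons_inactive]
      · intro s
        rw [aGo, hlen, if_neg (by simp)]
        rw [(ih (t + 1) (acc ++ [(s, t - 1)])).1]
        simp only [List.takeWhile_cons, List.dropWhile_cons, bne_self_eq_false,
          Bool.false_eq_true, if_false, List.length_nil, Nat.cast_zero, add_zero]
        rw [hstep, grpB_cons_inactive]
        simp
    · have hq : (v != 0) = true := by simp [bne, hv]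
      constructor
      · rw [aGo, hlen, if_pos hv]
        rw [(ih (t + 1) acc).2 t]
        rw [enumF, grpB_cons_active t v hv]
        have ht : (enumF (t + 1) rest).takeWhile (fun p => p.2 != 0)
            = enumF (t + 1) (rest.takeWhile (fun w => w != 0)) :=
          enumF_takeWhile (fun w => w != 0) rest (t + 1)
        have hd : (enumF (t + 1) rest).dropWhile (fun p => p.2 != 0)
            = enumF ((t + 1) + ((rest.takeWhile (fun w => w != 0)).length : Int))
                    (rest.dropWhile (fun w => w != 0)) :=
          enumF_dropWhile (fun w => w != 0) rest (t + 1)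
        rw [ht, hd, enumF_getLastD]
        by_cases hr : rest.takeWhile (fun w => w != 0) = []
        · simp [hr]
        · simp only [hr, if_false]
          have harr : t + 1 + ((rest.takeWhile (fun w => w != 0)).length : Int) - 1
              = t + ((rest.takeWhile (fun w => w != 0)).length : Int) := by ring
          rw [harr]
      · intro s
        rw [aGo, hlen, if_pos hv]
        rw [(ih (t + 1) acc).2 s]
        simp only [List.takeWhile_cons, List.dropWhile_cons, hq, if_true, List.length_cons]
        push_cast
        ring_nf

-- ===== VERDICT (by name: the statement is the Claim_ definition above) =====
theorem get_active_periods_py_spec : Claim_equal_get_active_periods_py := by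
  intro timeline _
  unfold Spec_get_active_periods_py get_active_periods_py get_active_periods_py_alt
  have h := (aGo_inv timeline 0 []).1
  simpa using h
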